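-- pv_equiv track=rewrite | github.com/zerojuhao/robolab | robolab/tasks/direct/attn_enc/agents/atom01_attn_enc_agent_cfg.py | generate_height_scan_mirror
-- ===== SOURCE A (Python) =====
-- def generate_height_scan_mirror(start_idx=140, rows=11, cols=17):
--     mirror_indices = []
--     for row in range(rows):
--         mirror_row = rows - 1 - row
--         for col in range(cols):
--             mirror_idx = start_idx + col + mirror_row * cols
--             mirror_indices.append(mirror_idx)
--     mirror_signs = [1] * (rows * cols)
--     return mirror_indices, mirror_signs
-- ===== SOURCE B (Python) =====
-- def generate_height_scan_mirror(start_idx=140, rows=11, cols=17):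
--     # One flat pass: recover (mirror_row, col) from the flat index k via divmod.
--     n = max(rows, 0) * max(cols, 0)
--     mirror_indices = [start_idx + (rows - 1 - k // cols) * cols + k % cols
--                       for k in range(n)]
--     return mirror_indices, [1] * len(mirror_indices)
-- ===== Notes on version B (the rewrite author's own statement) =====
-- stated objective: alternative
-- what changed: B replaces A's nested row/column loops with a single flat pass over range(rows*cols), recovering the mirrored row and the column from the flat index by integer division and remainder, and sizing the sign list from the index list it built.
-- intended difference: For rows <= -1 and cols <= -1 (nonsense negative counts where rows*cols > 0), A returns an empty index list paired with rows*cols ones as signs -- an inconsistent length mismatch caused by range() clamping only the loops -- while B treats negative counts as zero and returns ([], []), keeping the two lists consistently sized. — e.g. on generate_height_scan_mirror(0, -1, -1): A returns ([], [1]), B returns ([], [])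
import Mathlib
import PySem

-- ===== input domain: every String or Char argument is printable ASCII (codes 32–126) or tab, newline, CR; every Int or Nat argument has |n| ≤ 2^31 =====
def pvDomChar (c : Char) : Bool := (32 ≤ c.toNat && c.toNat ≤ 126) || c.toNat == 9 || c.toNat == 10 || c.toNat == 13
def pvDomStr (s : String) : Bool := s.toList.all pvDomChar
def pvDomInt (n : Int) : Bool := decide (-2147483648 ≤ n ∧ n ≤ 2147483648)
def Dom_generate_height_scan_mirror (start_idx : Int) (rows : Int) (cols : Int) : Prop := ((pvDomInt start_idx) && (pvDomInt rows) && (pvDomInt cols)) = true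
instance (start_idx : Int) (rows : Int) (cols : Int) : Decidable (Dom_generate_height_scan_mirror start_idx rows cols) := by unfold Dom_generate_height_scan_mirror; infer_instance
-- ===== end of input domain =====

-- B makes one flat pass over range(rows*cols), recovering the mirrored row and column
-- from the flat index by divmod, instead of A's nested loops (objective: alternative).


-- ===== PORT A =====
def generate_height_scan_mirror (start_idx : Int) (rows : Int) (cols : Int) : List Int × List Int :=
  let mirror_indices :=
    (PySem.List.pyRange 0 rows 1).foldl (fun acc row =>
      let mirror_row := rows - 1 - row
      (PySem.List.pyRange 0 cols 1).foldl (fun acc2 col =>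
        acc2 ++ [start_idx + col + mirror_row * cols]) acc) []
  let mirror_signs := List.replicate (rows * cols).toNat (1 : Int)
  (mirror_indices, mirror_signs)

-- ===== PORT B =====
def generate_height_scan_mirror_alt (start_idx : Int) (rows : Int) (cols : Int) : List Int × List Int :=
  let mirror_indices := (PySem.List.pyRange 0 (max rows 0 * max cols 0) 1).map (fun k =>
    start_idx + (rows - 1 - PySem.Int.floordiv k cols) * cols + PySem.Int.mod k cols)
  (mirror_indices, List.replicate mirror_indices.length (1 : Int))

-- ===== PRECONDITION & SPEC =====
-- For rows ≤ -1 and cols ≤ -1 (nonsense negative counts where rows*cols > 0), A returns an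
-- empty index list paired with rows*cols ones as signs — an inconsistent length mismatch from
-- range() clamping only the loops — while B treats negative counts as zero and returns ([], []).
def D_generate_height_scan_mirror (start_idx : Int) (rows : Int) (cols : Int) : Prop :=
  rows ≤ -1 ∧ cols ≤ -1
instance (start_idx : Int) (rows : Int) (cols : Int) : Decidable (D_generate_height_scan_mirror start_idx rows cols) := by unfold D_generate_height_scan_mirror; infer_instance

def Spec_generate_height_scan_mirror (start_idx : Int) (rows : Int) (cols : Int) (out : List Int × List Int) : Prop := ¬ D_generate_height_scan_mirror start_idx rows cols → out = generate_height_scan_mirror_alt start_idx rows cols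
instance (start_idx : Int) (rows : Int) (cols : Int) (out : List Int × List Int) : Decidable (Spec_generate_height_scan_mirror start_idx rows cols out) := by unfold Spec_generate_height_scan_mirror; infer_instance

def pvDiffWitness_generate_height_scan_mirror : Int × Int × Int := (0, -1, -1)
def pvDiffWitnessOut_generate_height_scan_mirror : (List Int × List Int) × (List Int × List Int) :=
  (([], [1]), ([], []))

-- ===== CLAIM (what is proved, stated in full; the proofs are below) =====
def Claim_unchanged_generate_height_scan_mirror : Prop := ∀ (start_idx : Int) (rows : Int) (cols : Int), Dom_generate_height_scan_mirror start_idx rows cols → Spec_generate_height_scan_mirror start_idx rows cols (generate_height_scan_mirror start_idx rows cols)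
def Claim_changed_generate_height_scan_mirror : Prop := Dom_generate_height_scan_mirror (pvDiffWitness_generate_height_scan_mirror.1) (pvDiffWitness_generate_height_scan_mirror.2.1) (pvDiffWitness_generate_height_scan_mirror.2.2) ∧ D_generate_height_scan_mirror (pvDiffWitness_generate_height_scan_mirror.1) (pvDiffWitness_generate_height_scan_mirror.2.1) (pvDiffWitness_generate_height_scan_mirror.2.2) ∧ generate_height_scan_mirror (pvDiffWitness_generate_height_scan_mirror.1) (pvDiffWitness_generate_height_scan_mirror.2.1) (pvDiffWitness_generate_height_scan_mirror.2.2) = pvDiffWitnessOut_generate_height_scan_mirror.1 ∧ generate_height_scan_mirror_alt (pvDiffWitness_generate_height_scan_mirror.1) (pvDiffWitness_generate_height_scan_mirror.2.1) (pvDiffWitness_generate_height_scan_mirror.2.2) = pvDiffWitnessOut_generate_height_scan_mirror.2 ∧ pvDiffWitnessOut_generate_height_scan_mirror.1 ≠ pvDiffWitnessOut_generate_height_scan_mirror.2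
def Claim_exact_generate_height_scan_mirror : Prop := ∀ (start_idx : Int) (rows : Int) (cols : Int), Dom_generate_height_scan_mirror start_idx rows cols → D_generate_height_scan_mirror start_idx rows cols → generate_height_scan_mirror start_idx rows cols ≠ generate_height_scan_mirror_alt start_idx rows cols

-- ===== LEMMAS AND PROOFS =====

-- A's inner loop over cols, started at m*cols offset, is a contiguous range.
theorem pv_inner_chunk (start_idx cols m : Int) :
    (PySem.List.pyRange 0 cols 1).map (fun col => start_idx + col + m * cols)
      = PySem.List.pyRange (start_idx + m * cols) (start_idx + (m + 1) * cols) 1 := by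
  simp only [PySem.List.pyRange_one, List.map_map]
  have hb : (start_idx + (m + 1) * cols - (start_idx + m * cols)) = cols - 0 := by ring
  rw [hb]
  exact List.map_congr_left (fun k _ => by simp only [Function.comp]; ring)

-- range(0, r*c) decomposes into r contiguous blocks of length c.
theorem pv_prod_range (r c : Int) (hr : 0 ≤ r) (hc : 0 ≤ c) :
    PySem.List.pyRange 0 (r * c) 1
      = (PySem.List.pyRange 0 r 1).flatMap (fun row =>
          (PySem.List.pyRange 0 c 1).map (fun col => row * c + col)) := by
  obtain ⟨n, rfl⟩ := Int.eq_ofNat_of_zero_le hr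
  induction n with
  | zero => simp [PySem.List.pyRange_one_eq_nil]
  | succ n ih =>
      have hstep : ((n : Int) + 1) * c = (n : Int) * c + c := by ring
      have hsplit : PySem.List.pyRange 0 (((n : Int) + 1) * c) 1
          = PySem.List.pyRange 0 ((n : Int) * c) 1
            ++ PySem.List.pyRange ((n : Int) * c) (((n : Int) + 1) * c) 1 := by
        exact PySem.List.pyRange_one_append 0 ((n : Int) * c) (((n : Int) + 1) * c)
          (mul_nonneg (Int.natCast_nonneg n) hc) (by nlinarith [Int.natCast_nonneg n])
      have hrange : PySem.List.pyRange 0 ((n : Int) + 1) 1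
          = PySem.List.pyRange 0 (n : Int) 1 ++ [(n : Int)] := by
        exact PySem.List.pyRange_one_succ_right (Int.natCast_nonneg n)
      have hchunk : PySem.List.pyRange ((n : Int) * c) (((n : Int) + 1) * c) 1
          = (PySem.List.pyRange 0 c 1).map (fun col => (n : Int) * c + col) := by
        have h := pv_inner_chunk 0 c (n : Int)
        simp only [zero_add] at h
        rw [← h]
        exact List.map_congr_left (fun k _ => by ring)
      push_cast
      rw [hsplit, ih (Int.natCast_nonneg n), hrange, List.flatMap_append, hchunk]
      simp [List.flatMap]

-- divmod recovers the block coordinates inside a block.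
theorem pv_divmod_block (row col c : Int) (hc : 0 < c) (h0 : 0 ≤ col) (h1 : col < c) :
    PySem.Int.floordiv (row * c + col) c = row ∧ PySem.Int.mod (row * c + col) c = col := by
  have hd : PySem.Int.floordiv (row * c + col) c = row := by
    rw [PySem.Int.floordiv_eq_iff_of_pos hc]
    constructor <;> nlinarith
  refine ⟨hd, ?_⟩
  have := PySem.Int.floordiv_mul_add_mod (row * c + col) c
  rw [hd] at this
  linarith

theorem pv_A_eq_B (start_idx rows cols : Int)
    (h : ¬ (rows ≤ -1 ∧ cols ≤ -1)) :
    generate_height_scan_mirror start_idx rows cols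
      = generate_height_scan_mirror_alt start_idx rows cols := by
  unfold generate_height_scan_mirror generate_height_scan_mirror_alt
  by_cases hr : rows ≤ 0
  · -- outer range empty on the A side; n = 0 on the B side
    have hrc : rows * cols ≤ 0 := by
      rcases (by omega : rows = 0 ∨ rows ≤ -1) with h0 | h1
      · simp [h0]
      · exact mul_nonpos_of_nonpos_of_nonneg (by omega) (by omega)
    have hn : max rows 0 * max cols 0 = 0 := by
      rw [max_eq_right hr]; ring
    simp [PySem.List.pyRange_one_eq_nil hr, hn, PySem.List.pyRange_zero,
      Int.toNat_of_nonpos hrc]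
  · push_neg at hr
    by_cases hc : cols ≤ 0
    · -- inner range empty on the A side; n = 0 on the B side
      have hrc : rows * cols ≤ 0 := mul_nonpos_of_nonneg_of_nonpos (by omega) hc
      have hn : max rows 0 * max cols 0 = 0 := by
        rw [max_eq_right hc]; ring
      have hfold : ∀ (l : List Int) (init : List Int),
          l.foldl (fun acc row =>
            (PySem.List.pyRange 0 cols 1).foldl (fun acc2 col =>
              acc2 ++ [start_idx + col + (rows - 1 - row) * cols]) acc) init
            = init := by
        intro l
        induction l with
        | nil => intro init; rfl
        | cons x xs ih =>
            intro init
            rw [List.foldl_cons, PySem.List.pyRange_one_eq_nil hc, List.foldl_nil]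
            have hx := ih init
            rw [PySem.List.pyRange_one_eq_nil hc] at hx
            exact hx
      rw [hfold]
      simp [hn, PySem.List.pyRange_zero, Int.toNat_of_nonpos hrc]
    · -- main case: rows ≥ 1 and cols ≥ 1
      push_neg at hc
      have hmr : max rows 0 = rows := max_eq_left (by omega)
      have hmc : max cols 0 = cols := max_eq_left (by omega)
      rw [hmr, hmc]
      refine Prod.ext ?_ ?_
      · show (PySem.List.pyRange 0 rows 1).foldl _ [] = _
        have hstep : ∀ (acc : List Int) (row : Int), row ∈ PySem.List.pyRange 0 rows 1 →
            (PySem.List.pyRange 0 cols 1).foldl (fun acc2 col =>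
                acc2 ++ [start_idx + col + (rows - 1 - row) * cols]) acc
              = acc ++ (PySem.List.pyRange 0 cols 1).map
                  (fun col => start_idx + col + (rows - 1 - row) * cols) := by
          intro acc row _
          rw [PySem.List.foldl_append_singleton_eq_map]
        have hA : (PySem.List.pyRange 0 rows 1).foldl (fun acc row =>
            (PySem.List.pyRange 0 cols 1).foldl (fun acc2 col =>
              acc2 ++ [start_idx + col + (rows - 1 - row) * cols]) acc) []
            = (PySem.List.pyRange 0 rows 1).flatMap (fun row =>
                (PySem.List.pyRange 0 cols 1).map
                  (fun col => start_idx + col + (rows - 1 - row) * cols)) := by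
          rw [PySem.List.foldl_congr_mem _ _
            (fun acc row => acc ++ (PySem.List.pyRange 0 cols 1).map
              (fun col => start_idx + col + (rows - 1 - row) * cols)) _ hstep]
          simpa using PySem.List.foldl_append_eq_flatMap
            (g := fun row => (PySem.List.pyRange 0 cols 1).map
              (fun col => start_idx + col + (rows - 1 - row) * cols))
            (l := PySem.List.pyRange 0 rows 1) (acc := [])
        rw [hA, pv_prod_range rows cols (by omega) (by omega), List.map_flatMap]
        refine List.flatMap_congr (fun row hrow => ?_)
        rw [List.map_map]
        refine List.map_congr_left (fun col hcol => ?_)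
        have hcb := (PySem.List.mem_pyRange_one).1 hcol
        obtain ⟨hdiv, hmod⟩ := pv_divmod_block row col cols hc hcb.1 hcb.2
        simp only [Function.comp, hdiv, hmod]
        ring
      · -- signs: B's list has length (rows*cols).toNat
        show List.replicate (rows * cols).toNat (1 : Int) = _
        simp [PySem.List.length_pyRange_one]

-- ===== VERDICT (by name: the statements are the Claim_ definitions above) =====
theorem generate_height_scan_mirror_spec : Claim_unchanged_generate_height_scan_mirror := by
  intro s r c _ hD
  exact pv_A_eq_B s r c hD

theorem generate_height_scan_mirror_changed : Claim_changed_generate_height_scan_mirror := by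
  unfold Claim_changed_generate_height_scan_mirror; decide

theorem generate_height_scan_mirror_tight : Claim_exact_generate_height_scan_mirror := by
  intro s r c _ hD heq
  obtain ⟨hr, hc⟩ := hD
  have hrc : (1 : Int) ≤ r * c := by nlinarith
  have hA2 : (generate_height_scan_mirror s r c).2 ≠ [] := by
    unfold generate_height_scan_mirror
    intro hnil
    have := congrArg List.length hnil
    simp at this
    omega
  have hB2 : (generate_height_scan_mirror_alt s r c).2 = [] := by
    unfold generate_height_scan_mirror_alt
    have hn : max r 0 * max c 0 = 0 := by
      rw [max_eq_right (by omega : r ≤ 0)]; ring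
    simp [hn, PySem.List.pyRange_zero]
  exact hA2 (by rw [heq, hB2])
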